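-- pv_equiv track=rewrite | github.com/eliottcassidy2000/math | 04-computation/higher_cycle_copart.py | directed_cycles
-- ===== SOURCE A (Python) =====
-- from collections import defaultdict
--
-- def directed_cycles(adj, n, max_length):
--     """Find all directed cycles up to max_length in adjacency matrix adj.
--     Returns dict: length -> list of vertex tuples (canonical form)."""
--     cycles = defaultdict(set)
--
--     for start in range(n):
--         # DFS from start, tracking path
--         stack = [(start, [start], 1 << start)]
--         while stack:
--             v, path, mask = stack.pop()
--             if len(path) > max_length:
--                 continue
--             for w in range(n):
--                 if not adj[v][w]:
--                     continue
--                 if w == start and len(path) >= 3: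
--                     # Found a cycle
--                     clen = len(path)
--                     # Canonical: minimum rotation
--                     min_rot = min(path[i:] + path[:i] for i in range(clen))
--                     cycles[clen].add(tuple(min_rot))
--                 elif not (mask & (1 << w)) and w > start:
--                     # Only go to vertices > start to avoid double counting
--                     stack.append((w, path + [w], mask | (1 << w)))
--
--     return cycles
-- ===== SOURCE B (Python) =====
-- from collections import defaultdict
--
-- def directed_cycles(adj, n, max_length):
--     """Find all directed cycles up to max_length in adjacency matrix adj.
--     Returns dict: length -> set of vertex tuples (canonical form).
--     Recursive DFS instead of an explicit stack; children are visited in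
--     descending order, which is the order a LIFO stack pops them in."""
--     cycles = defaultdict(set)
--
--     def dfs(start, v, path, mask):
--         if len(path) > max_length:
--             return
--         if len(path) >= 3 and adj[v][start]:
--             # cycle closed back to start; canonical form: rotation that is
--             # the lexicographic minimum of all rotations
--             clen = len(path)
--             min_rot = min(path[i:] + path[:i] for i in range(clen))
--             cycles[clen].add(tuple(min_rot))
--         for w in range(n - 1, -1, -1):
--             if adj[v][w] and w > start and not (mask & (1 << w)):
--                 dfs(start, w, path + [w], mask | (1 << w))
--
--     for start in range(n):
--         dfs(start, start, [start], 1 << start)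
--     return cycles
-- ===== Notes on version B (the rewrite author's own statement) =====
-- stated objective: simpler
-- what changed: A's explicit-stack DFS (while-loop popping (vertex, path, mask) tuples) is replaced by a plain recursive dfs helper that records a cycle on closing back to start and recurses over neighbours in descending order (the order a LIFO stack pops them in).
import Mathlib
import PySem

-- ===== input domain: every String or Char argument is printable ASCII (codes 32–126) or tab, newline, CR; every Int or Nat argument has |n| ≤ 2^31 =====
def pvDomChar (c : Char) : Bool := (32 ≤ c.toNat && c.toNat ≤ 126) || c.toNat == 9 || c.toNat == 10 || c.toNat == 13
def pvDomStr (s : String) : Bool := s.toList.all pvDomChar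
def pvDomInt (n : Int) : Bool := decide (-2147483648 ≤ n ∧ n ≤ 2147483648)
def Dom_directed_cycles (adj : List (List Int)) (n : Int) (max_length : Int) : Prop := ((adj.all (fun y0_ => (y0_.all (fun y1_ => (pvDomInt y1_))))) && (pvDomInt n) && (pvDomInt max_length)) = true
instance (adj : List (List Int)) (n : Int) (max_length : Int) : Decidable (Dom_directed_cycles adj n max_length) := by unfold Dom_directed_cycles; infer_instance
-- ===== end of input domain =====

-- B replaces A's explicit-stack DFS by a plain recursive DFS helper (children visited in
-- descending vertex order, which is exactly the order a LIFO stack pops them in); objective: simpler.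

-- ===== PORT A =====
-- shared transliteration helpers (lines identical in Source A and Source B):
-- `min(path[i:] + path[:i] for i in range(clen))`; callers only use it with path ≠ []
-- (clen ≥ 3), so min? is some and the `none => []` arm is unreachable
def pvMinRot (path : List Int) : List Int :=
  match PySem.List.min?
      ((PySem.List.pyRange 0 (PySem.List.len path) 1).map
        (fun i => PySem.List.slice path (some i) none ++ PySem.List.slice path none (some i)))
      (fun x => x) with
  | some m => m
  | none => []

-- `cycles[clen].add(tuple(min_rot))` on a defaultdict(set)
def pvRecord (path : List Int) (d : PySem.Dict Int (PySem.Set (List Int))) :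
    PySem.Dict Int (PySem.Set (List Int)) :=
  PySem.Dict.insert d (path.length : Int)
    (PySem.Set.add (PySem.Dict.getD d (path.length : Int) PySem.Set.empty) (pvMinRot path))

-- `adj[v][w]`; always in range under Pre_ (0 ≤ v,w < n ≤ row/col counts)
def pvRowGet (adj : List (List Int)) (v w : Int) : Int :=
  PySem.List.pyGetD (PySem.List.pyGetD adj v []) w 0

-- body of A's `for w in range(n)` loop: state = (cycles, children appended so far)
def pvStepA (adj : List (List Int)) (start v : Int) (path : List Int) (mask : Nat)
    (s : PySem.Dict Int (PySem.Set (List Int)) × List Int) (w : Int) :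
    PySem.Dict Int (PySem.Set (List Int)) × List Int :=
  if pvRowGet adj v w = 0 then s
  else if w = start ∧ 3 ≤ path.length then (pvRecord path s.1, s.2)
  else if mask &&& (1 <<< w.toNat) = 0 ∧ start < w then (s.1, s.2 ++ [w])
  else s

-- weight of a pending stack entry / whole stack, for termination only
def pvStackW (n max_length : Int) (st : List (Int × List Int × Nat)) : Nat :=
  (st.map (fun e => (n.toNat + 1) ^ (max_length.toNat + 2 - e.2.1.length))).sum

-- the children list grows by at most one element per loop iteration (termination bound)
theorem pvStepA_children_le (adj : List (List Int)) (start v : Int) (path : List Int)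
    (mask : Nat) (ws : List Int) (s : PySem.Dict Int (PySem.Set (List Int)) × List Int) :
    ((ws.foldl (pvStepA adj start v path mask) s).2).length ≤ s.2.length + ws.length := by
  induction ws generalizing s with
  | nil => simp
  | cons w t ih =>
    refine le_trans (by simpa using ih (pvStepA adj start v path mask s w)) ?_
    unfold pvStepA
    split_ifs <;> simp <;> omega

-- A's `while stack:` loop; the stack is kept top-first (Python appends at the end and
-- pops the end; here the ascending-order children are pushed reversed at the head,
-- which is the same pop order); mask is Python's nonnegative int bitmask, kept as Nat
def pvRunA (adj : List (List Int)) (n max_length start : Int) :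
    List (Int × List Int × Nat) → PySem.Dict Int (PySem.Set (List Int)) →
    PySem.Dict Int (PySem.Set (List Int))
  | [], acc => acc
  | (v, path, mask) :: rest, acc =>
    if max_length < (path.length : Int) then pvRunA adj n max_length start rest acc
    else
      pvRunA adj n max_length start
        (((PySem.List.pyRange 0 n 1).foldl (pvStepA adj start v path mask)
            (acc, [])).2.reverse.map
          (fun w => (w, path ++ [w], mask ||| (1 <<< w.toNat))) ++ rest)
        ((PySem.List.pyRange 0 n 1).foldl (pvStepA adj start v path mask) (acc, [])).1
termination_by st => pvStackW n max_length st
decreasing_by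
  · have hpos : 0 < (n.toNat + 1) ^ (max_length.toNat + 2 - path.length) :=
      pow_pos (Nat.succ_pos _) _
    simp only [pvStackW, List.map_cons, List.sum_cons]
    omega
  · rename_i h
    have hlen : path.length ≤ max_length.toNat := by omega
    have hc : ((PySem.List.pyRange 0 n 1).foldl (pvStepA adj start v path mask)
        (acc, [])).2.length ≤ n.toNat := by
      have h2 := pvStepA_children_le adj start v path mask (PySem.List.pyRange 0 n 1) (acc, [])
      have h3 : (PySem.List.pyRange 0 n 1).length = n.toNat := by
        rw [PySem.List.length_pyRange_one]; omega
      simpa [h3] using h2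
    simp only [pvStackW, List.map_append, List.sum_append, List.map_cons, List.sum_cons,
      List.map_map]
    have hfun : ((fun e : Int × List Int × Nat =>
          (n.toNat + 1) ^ (max_length.toNat + 2 - e.2.1.length)) ∘
        (fun w : Int => (w, path ++ [w], mask ||| (1 <<< w.toNat))))
        = fun _ => (n.toNat + 1) ^ (max_length.toNat + 1 - path.length) := by
      funext w
      show (n.toNat + 1) ^ (max_length.toNat + 2 - (path ++ [w]).length) = _
      rw [List.length_append, List.length_cons, List.length_nil]
      congr 1
      omega
    rw [hfun, List.map_const', List.sum_replicate, smul_eq_mul, List.length_reverse]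
    have hexp : (n.toNat + 1) ^ (max_length.toNat + 2 - path.length)
        = (n.toNat + 1) ^ (max_length.toNat + 1 - path.length) * (n.toNat + 1) := by
      rw [← pow_succ]
      congr 1
      omega
    have hXpos : 0 < (n.toNat + 1) ^ (max_length.toNat + 1 - path.length) :=
      pow_pos (Nat.succ_pos _) _
    have hlt : ((PySem.List.pyRange 0 n 1).foldl (pvStepA adj start v path mask)
          (acc, [])).2.length * (n.toNat + 1) ^ (max_length.toNat + 1 - path.length)
        < (n.toNat + 1) ^ (max_length.toNat + 2 - path.length) := by
      rw [hexp]
      calc ((PySem.List.pyRange 0 n 1).foldl (pvStepA adj start v path mask)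
            (acc, [])).2.length * (n.toNat + 1) ^ (max_length.toNat + 1 - path.length)
          ≤ n.toNat * (n.toNat + 1) ^ (max_length.toNat + 1 - path.length) :=
            mul_le_mul_right' hc _
        _ < (n.toNat + 1) * (n.toNat + 1) ^ (max_length.toNat + 1 - path.length) :=
            mul_lt_mul_of_pos_right (Nat.lt_succ_self _) hXpos
        _ = (n.toNat + 1) ^ (max_length.toNat + 1 - path.length) * (n.toNat + 1) :=
            mul_comm _ _
    omega

def directed_cycles (adj : List (List Int)) (n : Int) (max_length : Int) :
    List (Int × List (List Int)) :=
  ((PySem.List.pyRange 0 n 1).foldl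
    (fun acc start =>
      pvRunA adj n max_length start [(start, [start], (1 <<< start.toNat : Nat))] acc)
    PySem.Dict.empty).items

-- ===== PORT B =====
-- Source B's recursive `dfs` (pvDfsB) and its `for w in range(n-1, -1, -1)` loop (pvGoB);
-- pvGoB carries the Prop `path.length ≤ max_length.toNat` (known from dfs's entry
-- guard) only for termination — it is erased and computes nothing.
mutual
def pvDfsB (adj : List (List Int)) (n max_length start v : Int) (path : List Int)
    (mask : Nat) (acc : PySem.Dict Int (PySem.Set (List Int))) :
    PySem.Dict Int (PySem.Set (List Int)) :=
  if h : max_length < (path.length : Int) then acc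
  else
    pvGoB adj n max_length start v path mask (by omega)
      (PySem.List.pyRange (n - 1) (-1) (-1))
      (if 3 ≤ path.length ∧ pvRowGet adj v start ≠ 0 then pvRecord path acc else acc)
termination_by (max_length.toNat + 2 - path.length, (PySem.List.pyRange (n - 1) (-1) (-1)).length + 1)
decreasing_by
  apply Prod.Lex.right
  omega

def pvGoB (adj : List (List Int)) (n max_length start v : Int) (path : List Int)
    (mask : Nat) (hp : path.length ≤ max_length.toNat) (ws : List Int)
    (acc : PySem.Dict Int (PySem.Set (List Int))) : PySem.Dict Int (PySem.Set (List Int)) :=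
  match ws with
  | [] => acc
  | w :: t =>
    pvGoB adj n max_length start v path mask hp t
      (if pvRowGet adj v w ≠ 0 ∧ start < w ∧ mask &&& (1 <<< w.toNat) = 0 then
        pvDfsB adj n max_length start w (path ++ [w]) (mask ||| (1 <<< w.toNat)) acc
      else acc)
termination_by (max_length.toNat + 2 - path.length, ws.length)
decreasing_by
  all_goals simp_wf
  all_goals first
    | (apply Prod.Lex.right; omega)
    | (apply Prod.Lex.left; try simp only [List.length_append, List.length_cons]
       omega)
end

def directed_cycles_alt (adj : List (List Int)) (n : Int) (max_length : Int) :
    List (Int × List (List Int)) :=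
  ((PySem.List.pyRange 0 n 1).foldl
    (fun acc start => pvDfsB adj n max_length start start [start] (1 <<< start.toNat) acc)
    PySem.Dict.empty).items

-- ===== PRECONDITION & SPEC =====
-- Pre_ excludes exactly the inputs where A raises IndexError: when n ≥ 1 and
-- max_length ≥ 1 every entry adj[v][w] with v,w < n is read, so adj needs at least
-- n rows and each of its first n rows at least n columns.
def Pre_directed_cycles (adj : List (List Int)) (n : Int) (max_length : Int) : Prop :=
  n ≤ 0 ∨ max_length ≤ 0 ∨
    (n ≤ (adj.length : Int) ∧ ∀ row ∈ adj.take n.toNat, n ≤ (row.length : Int))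
instance (adj : List (List Int)) (n : Int) (max_length : Int) :
    Decidable (Pre_directed_cycles adj n max_length) := by
  unfold Pre_directed_cycles; infer_instance

def pvWitness_directed_cycles : List (List Int) × Int × Int := ([[0, 1], [1, 0]], 2, 3)

def Spec_directed_cycles (adj : List (List Int)) (n : Int) (max_length : Int)
    (out : List (Int × List (List Int))) : Prop := out = directed_cycles_alt adj n max_length
instance (adj : List (List Int)) (n : Int) (max_length : Int)
    (out : List (Int × List (List Int))) : Decidable (Spec_directed_cycles adj n max_length out) := by
  unfold Spec_directed_cycles; infer_instance

-- ===== CLAIM (what is proved, stated in full; the proofs are below) =====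
def Claim_equal_directed_cycles : Prop := ∀ (adj : List (List Int)) (n : Int) (max_length : Int), Dom_directed_cycles adj n max_length → Pre_directed_cycles adj n max_length → Spec_directed_cycles adj n max_length (directed_cycles adj n max_length)

-- ===== LEMMAS AND PROOFS =====

-- the dict component of one iteration of A's inner loop
def pvDStep (adj : List (List Int)) (start v : Int) (path : List Int)
    (d : PySem.Dict Int (PySem.Set (List Int))) (w : Int) :
    PySem.Dict Int (PySem.Set (List Int)) :=
  if pvRowGet adj v w ≠ 0 ∧ w = start ∧ 3 ≤ path.length then pvRecord path d else d

-- the condition under which A pushes w as a child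
def pvCh (adj : List (List Int)) (start v : Int) (path : List Int) (mask : Nat) (w : Int) : Bool :=
  decide (pvRowGet adj v w ≠ 0 ∧ ¬(w = start ∧ 3 ≤ path.length) ∧
    (mask &&& (1 <<< w.toNat) = 0 ∧ start < w))

theorem pvFoldStep_eq (adj : List (List Int)) (start v : Int) (path : List Int) (mask : Nat) :
    ∀ (ws : List Int) (d : PySem.Dict Int (PySem.Set (List Int))) (c : List Int),
      ws.foldl (pvStepA adj start v path mask) (d, c)
        = (ws.foldl (pvDStep adj start v path) d, c ++ ws.filter (pvCh adj start v path mask)) := by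
  intro ws
  induction ws with
  | nil => intro d c; simp
  | cons w t ih =>
    intro d c
    rw [List.foldl_cons]
    by_cases h1 : pvRowGet adj v w = 0
    · rw [show pvStepA adj start v path mask (d, c) w = (d, c) from by simp [pvStepA, h1]]
      rw [ih]
      simp [pvDStep, pvCh, List.filter_cons, h1]
    · by_cases h2 : w = start ∧ 3 ≤ path.length
      · obtain ⟨hws, hl3⟩ := h2
        rw [show pvStepA adj start v path mask (d, c) w = (pvRecord path d, c) from by
          simp [pvStepA, hws, hl3, hws ▸ h1]]
        rw [ih]
        simp [pvDStep, pvCh, List.filter_cons, hws, hl3, hws ▸ h1]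
      · by_cases h3 : mask &&& (1 <<< w.toNat) = 0 ∧ start < w
        · rw [show pvStepA adj start v path mask (d, c) w = (d, c ++ [w]) from by
            simp [pvStepA, h1, h2, h3]]
          rw [ih]
          simp [pvDStep, pvCh, List.filter_cons, h1, h2, h3]
        · rw [show pvStepA adj start v path mask (d, c) w = (d, c) from by
            simp [pvStepA, h1, h2, h3]]
          rw [ih]
          simp [pvDStep, pvCh, List.filter_cons, h1, h2, h3]

theorem pvDictF_no (adj : List (List Int)) (start v : Int) (path : List Int) :
    ∀ (ws : List Int) (d : PySem.Dict Int (PySem.Set (List Int))), start ∉ ws →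
      ws.foldl (pvDStep adj start v path) d = d := by
  intro ws
  induction ws with
  | nil => intro d _; rfl
  | cons w t ih =>
    intro d hmem
    rw [List.foldl_cons]
    have hw : ¬ w = start := fun h => hmem (h ▸ List.mem_cons_self ..)
    rw [show pvDStep adj start v path d w = d from by simp [pvDStep, hw]]
    exact ih d (fun h => hmem (List.mem_cons_of_mem _ h))

theorem pvDictF_char (adj : List (List Int)) (start v : Int) (path : List Int) :
    ∀ (ws : List Int) (d : PySem.Dict Int (PySem.Set (List Int))), ws.Nodup →
      ws.foldl (pvDStep adj start v path) d
        = if start ∈ ws ∧ pvRowGet adj v start ≠ 0 ∧ 3 ≤ path.length then pvRecord path d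
          else d := by
  intro ws
  induction ws with
  | nil => intro d _; simp
  | cons w t ih =>
    intro d hnd
    rcases List.nodup_cons.mp hnd with ⟨hwt, hndt⟩
    rw [List.foldl_cons]
    by_cases hw : w = start
    · subst hw
      rw [show ∀ d', pvDStep adj w v path d' w
            = if pvRowGet adj v w ≠ 0 ∧ 3 ≤ path.length then pvRecord path d' else d' from by
          intro d'; simp [pvDStep]]
      by_cases hC : pvRowGet adj v w ≠ 0 ∧ 3 ≤ path.length
      · rw [if_pos hC, pvDictF_no adj w v path t _ hwt,
          if_pos ⟨List.mem_cons_self .., hC⟩]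
      · rw [if_neg hC, pvDictF_no adj w v path t _ hwt, if_neg]
        rintro ⟨-, he, hl⟩
        exact hC ⟨he, hl⟩
    · rw [show pvDStep adj start v path d w = d from by simp [pvDStep, hw], ih d hndt]
      have hiff : (start ∈ w :: t) ↔ (start ∈ t) := by
        simp only [List.mem_cons]
        constructor
        · rintro (h | h)
          · exact absurd h.symm hw
          · exact h
        · exact Or.inr
      by_cases hC : pvRowGet adj v start ≠ 0 ∧ 3 ≤ path.length
      · by_cases hm : start ∈ t
        · rw [if_pos ⟨hm, hC⟩, if_pos ⟨hiff.mpr hm, hC⟩]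
        · rw [if_neg (fun h => hm h.1), if_neg (fun h => hm (hiff.mp h.1))]
      · rw [if_neg (fun h => hC h.2), if_neg (fun h => hC h.2)]

theorem pvGoB_eq (adj : List (List Int)) (n max_length start v : Int) (path : List Int)
    (mask : Nat) (hp : path.length ≤ max_length.toNat) :
    ∀ (ws : List Int) (acc : PySem.Dict Int (PySem.Set (List Int))),
      pvGoB adj n max_length start v path mask hp ws acc
        = (ws.filter (fun w =>
              decide (pvRowGet adj v w ≠ 0 ∧ start < w ∧ mask &&& (1 <<< w.toNat) = 0))).foldl
            (fun a w => pvDfsB adj n max_length start w (path ++ [w]) (mask ||| (1 <<< w.toNat)) a)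
            acc := by
  intro ws
  induction ws with
  | nil => intro acc; simp [pvGoB]
  | cons w t ih =>
    intro acc
    rw [pvGoB]
    split_ifs with h
    · rw [ih, List.filter_cons, if_pos (by exact decide_eq_true h), List.foldl_cons]
    · rw [ih, List.filter_cons, if_neg (by simpa using h)]

theorem pvCh_eq (adj : List (List Int)) (start v : Int) (path : List Int) (mask : Nat)
    (w : Int) :
    pvCh adj start v path mask w
      = decide (pvRowGet adj v w ≠ 0 ∧ start < w ∧ mask &&& (1 <<< w.toNat) = 0) := by
  unfold pvCh
  rw [decide_eq_decide]
  constructor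
  · rintro ⟨h1, -, h3, h4⟩
    exact ⟨h1, h4, h3⟩
  · rintro ⟨h1, h4, h3⟩
    exact ⟨h1, fun hc => absurd h4 (by rw [hc.1]; exact lt_irrefl _), h3, h4⟩

theorem pvRange_desc (n : Int) :
    PySem.List.pyRange (n - 1) (-1) (-1) = (PySem.List.pyRange 0 n 1).reverse := by
  rw [PySem.List.pyRange_neg_one_eq_reverse]
  norm_num

theorem pv_main (adj : List (List Int)) (n max_length start : Int)
    (hs0 : 0 ≤ start) (hsn : start < n) :
    ∀ st acc, pvRunA adj n max_length start st acc
      = st.foldl (fun a e => pvDfsB adj n max_length start e.1 e.2.1 e.2.2 a) acc := by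
  intro st acc
  induction st, acc using pvRunA.induct adj n max_length start with
  | case1 acc => simp [pvRunA]
  | case2 v path mask rest acc hguard ih =>
    rw [pvRunA, if_pos hguard, ih]
    show _ = List.foldl _ (pvDfsB adj n max_length start v path mask acc) rest
    rw [pvDfsB, dif_pos hguard]
  | case3 v path mask rest acc hguard ih =>
    rw [pvRunA, if_neg hguard]
    refine Eq.trans ih ?_
    rw [List.foldl_append, List.foldl_cons]
    have hlen : path.length ≤ max_length.toNat := by omega
    have hmemr : start ∈ PySem.List.pyRange 0 n 1 :=
      PySem.List.mem_pyRange_one.mpr ⟨hs0, hsn⟩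
    have h1 : ((PySem.List.pyRange 0 n 1).foldl (pvStepA adj start v path mask)
        (acc, [])).1 = (PySem.List.pyRange 0 n 1).foldl (pvDStep adj start v path) acc := by
      rw [pvFoldStep_eq]
    have h2 : ((PySem.List.pyRange 0 n 1).foldl (pvStepA adj start v path mask)
        (acc, [])).2 = (PySem.List.pyRange 0 n 1).filter (pvCh adj start v path mask) := by
      rw [pvFoldStep_eq]
      simp
    have hkey : List.foldl (fun a (e : Int × List Int × Nat) =>
        pvDfsB adj n max_length start e.1 e.2.1 e.2.2 a)
        (((PySem.List.pyRange 0 n 1).foldl (pvStepA adj start v path mask) (acc, [])).1)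
        ((((PySem.List.pyRange 0 n 1).foldl (pvStepA adj start v path mask)
            (acc, [])).2).reverse.map
          (fun w => (w, path ++ [w], mask ||| (1 <<< w.toNat))))
        = pvDfsB adj n max_length start v path mask acc := by
      rw [h1, h2]
      rw [pvDfsB, dif_neg hguard,
        pvGoB_eq adj n max_length start v path mask hlen, pvRange_desc n, List.filter_reverse,
        List.filter_congr (fun (w : Int) _ => (pvCh_eq adj start v path mask w).symm),
        pvDictF_char adj start v path _ acc (PySem.List.nodup_pyRange_one 0 n),
        List.foldl_map]
      have hinit : (if start ∈ PySem.List.pyRange 0 n 1 ∧ pvRowGet adj v start ≠ 0 ∧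
            3 ≤ path.length then pvRecord path acc else acc)
          = (if 3 ≤ path.length ∧ pvRowGet adj v start ≠ 0 then pvRecord path acc
            else acc) := by
        by_cases hc : pvRowGet adj v start ≠ 0 ∧ 3 ≤ path.length
        · rw [if_pos ⟨hmemr, hc⟩, if_pos ⟨hc.2, hc.1⟩]
        · rw [if_neg (fun h => hc ⟨h.2.1, h.2.2⟩), if_neg (fun h => hc ⟨h.2, h.1⟩)]
      rw [hinit]
    rw [hkey]

-- ===== VERDICT (by name: the statement is the Claim_ definition above) =====
theorem directed_cycles_spec : Claim_equal_directed_cycles := by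
  intro adj n max_length _ _
  unfold Spec_directed_cycles directed_cycles directed_cycles_alt
  refine congrArg PySem.Dict.items ?_
  refine PySem.List.foldl_congr_mem _ _ _ _ ?_
  intro acc start hmem
  have h := PySem.List.mem_pyRange_one.mp hmem
  simpa using pv_main adj n max_length start h.1 h.2
    [(start, [start], (1 <<< start.toNat : Nat))] acc
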